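-- pv_equiv track=rewrite | github.com/StrattonOakmontAI/ict-watchlists-starter | app/macro.py | _join_folded_ics
-- ===== SOURCE A (Python) =====
-- from typing import List, Tuple, Optional
--
-- def _join_folded_ics(lines: List[str]) -> List[str]:
--     out = []
--     for ln in lines:
--         if ln.startswith((" ", "\t")) and out:
--             out[-1] += ln.strip()
--         else:
--             out.append(ln.rstrip("\n"))
--     return out
-- ===== SOURCE B (Python) =====
-- from typing import List
--
-- def _join_folded_ics(lines: List[str]) -> List[str]:
--     out = []
--     i = 0
--     n = len(lines)
--     while i < n:
--         head = lines[i].rstrip("\n")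
--         i += 1
--         parts = []
--         while i < n and lines[i].startswith((" ", "\t")):
--             parts.append(lines[i].strip())
--             i += 1
--         out.append(head + "".join(parts))
--     return out
-- ===== Notes on version B (the rewrite author's own statement) =====
-- stated objective: alternative
-- what changed: Replaces A's single fold that mutates out[-1] on each continuation line by an explicit index scan: each head line consumes its whole run of continuation lines in an inner while loop, joining them at once.
import Mathlib
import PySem

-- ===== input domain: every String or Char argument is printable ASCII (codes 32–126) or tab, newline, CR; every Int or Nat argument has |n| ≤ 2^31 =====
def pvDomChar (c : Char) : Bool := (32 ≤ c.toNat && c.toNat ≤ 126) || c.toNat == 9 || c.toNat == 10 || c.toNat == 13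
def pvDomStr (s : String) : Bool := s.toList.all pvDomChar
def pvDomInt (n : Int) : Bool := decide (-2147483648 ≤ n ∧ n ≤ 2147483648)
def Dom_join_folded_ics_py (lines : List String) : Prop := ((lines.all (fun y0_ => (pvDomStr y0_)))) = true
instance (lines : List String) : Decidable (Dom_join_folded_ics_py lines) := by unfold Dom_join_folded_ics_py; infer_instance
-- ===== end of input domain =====

-- B replaces A's fold that mutates out[-1] by an index scan: each head consumes its
-- run of continuation lines in an inner loop (objective: alternative decomposition, same cost).

-- ln.rstrip("\n"): PySem has no rstrip-with-chars, so ported by hand; exact because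
-- Python's rstrip("\n") removes exactly the trailing '\n' characters.
def pvRstripNl (s : String) : String :=
  String.ofList ((s.toList.reverse.dropWhile (· == '\n')).reverse)

-- ln.startswith((" ", "\t"))
def pvIsCont (ln : String) : Bool :=
  PySem.Str.startswith ln " " || PySem.Str.startswith ln "\t"

-- ===== PORT A =====
def join_folded_ics_py (lines : List String) : List String :=
  lines.foldl
    (fun out ln =>
      if pvIsCont ln && !out.isEmpty then
        out.dropLast ++ [(out.getLast?.getD "") ++ PySem.Str.strip ln]
      else
        out ++ [pvRstripNl ln])
    []

-- ===== PORT B =====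
def join_folded_ics_py_alt (lines : List String) : List String :=
  match lines with
  | [] => []
  | ln :: rest =>
      let parts := (rest.takeWhile pvIsCont).map PySem.Str.strip
      (pvRstripNl ln ++ PySem.Str.join "" parts) ::
        join_folded_ics_py_alt (rest.dropWhile pvIsCont)
termination_by lines.length
decreasing_by
  simpa using Nat.lt_succ_of_le (List.length_dropWhile_le _ _)

-- ===== PRECONDITION & SPEC =====
def Spec_join_folded_ics_py (lines : List String) (out : List String) : Prop := out = join_folded_ics_py_alt lines
instance (lines : List String) (out : List String) : Decidable (Spec_join_folded_ics_py lines out) := by unfold Spec_join_folded_ics_py; infer_instance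

-- ===== CLAIM (what is proved, stated in full; the proofs are below) =====
def Claim_equal_join_folded_ics_py : Prop := ∀ (lines : List String), Dom_join_folded_ics_py lines → Spec_join_folded_ics_py lines (join_folded_ics_py lines)

-- ===== LEMMAS AND PROOFS =====

theorem pv_alt_nil : join_folded_ics_py_alt [] = [] := by
  rw [join_folded_ics_py_alt.eq_def]

theorem pv_alt_cons (ln : String) (rest : List String) :
    join_folded_ics_py_alt (ln :: rest) =
      (pvRstripNl ln ++ PySem.Str.join "" ((rest.takeWhile pvIsCont).map PySem.Str.strip)) ::
        join_folded_ics_py_alt (rest.dropWhile pvIsCont) := by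
  rw [join_folded_ics_py_alt.eq_def]

theorem pv_join_cons (a : String) (l : List String) :
    PySem.Str.join "" (a :: l) = a ++ PySem.Str.join "" l := by
  apply String.ext
  simp [PySem.Str.toList_join, PySem.Chars.join, List.intercalate]
  cases l <;> simp

theorem pv_join_nil : PySem.Str.join "" ([] : List String) = "" := by
  apply String.ext
  simp [PySem.Str.toList_join, PySem.Chars.join, List.intercalate]

-- main invariant: folding A's step from a nonempty accumulator pre ++ [h]
theorem pv_fold_inv (rest : List String) :
    ∀ (pre : List String) (h : String),
    List.foldl
      (fun out ln =>
        if pvIsCont ln && !out.isEmpty then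
          out.dropLast ++ [(out.getLast?.getD "") ++ PySem.Str.strip ln]
        else
          out ++ [pvRstripNl ln]) (pre ++ [h]) rest
    = pre ++ (h ++ PySem.Str.join "" ((rest.takeWhile pvIsCont).map PySem.Str.strip)) ::
        join_folded_ics_py_alt (rest.dropWhile pvIsCont) := by
  induction rest with
  | nil => intro pre h; simp [pv_join_nil, pv_alt_nil]
  | cons ln rest ih =>
      intro pre h
      by_cases hc : pvIsCont ln = true
      · have hcond : (pvIsCont ln && !(pre ++ [h]).isEmpty) = true := by simp [hc]
        have hacc : (pre ++ [h]).dropLast ++ [(pre ++ [h]).getLast?.getD "" ++ PySem.Str.strip ln]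
            = pre ++ [h ++ PySem.Str.strip ln] := by simp
        rw [List.foldl_cons, if_pos hcond, hacc, ih pre (h ++ PySem.Str.strip ln)]
        simp only [List.takeWhile_cons, List.dropWhile_cons, hc, if_true, List.map_cons,
          pv_join_cons]
        simp [String.append_assoc]
      · have hc' : pvIsCont ln = false := by simpa using hc
        have hcond : ¬ ((pvIsCont ln && !(pre ++ [h]).isEmpty) = true) := by simp [hc']
        rw [List.foldl_cons, if_neg hcond, ih (pre ++ [h]) (pvRstripNl ln)]
        simp only [List.takeWhile_cons, List.dropWhile_cons, hc', Bool.false_eq_true, if_false,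
          List.map_nil, pv_join_nil, pv_alt_cons, List.append_assoc, List.cons_append,
          List.nil_append]
        simp

-- ===== VERDICT (by name: the statement is the Claim_ definition above) =====
theorem join_folded_ics_py_spec : Claim_equal_join_folded_ics_py := by
  intro lines _
  unfold Spec_join_folded_ics_py
  cases lines with
  | nil => simp [join_folded_ics_py, pv_alt_nil]
  | cons ln rest =>
      have hcond : ¬ ((pvIsCont ln && !([] : List String).isEmpty) = true) := by simp
      simp only [join_folded_ics_py, List.foldl_cons, if_neg hcond]
      rw [show (([] : List String) ++ [pvRstripNl ln]) = [] ++ [pvRstripNl ln] from rfl,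
        pv_fold_inv rest [] (pvRstripNl ln), pv_alt_cons]
      simp
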